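-- pv_equiv track=rewrite | github.com/Si-36/osiris | core/src/aura_intelligence/memory/consolidation/orchestrator.py | _cluster_by_similarity
-- ===== SOURCE A (Python) =====
-- from typing import Dict, Any, List, Optional, Set, Tuple
--
-- def _cluster_by_similarity(memories: List[Any],
--                           cluster_size: int = 10) -> List[List[Any]]:
--     """
--     Cluster memories by topological similarity
--
--     Args:
--         memories: List of memories to cluster
--         cluster_size: Target size for each cluster
--
--     Returns:
--         List of memory clusters
--     """
--     # Simple clustering for now - can be enhanced with proper algorithms
--     clusters = []
--     current_cluster = []
--
--     for memory in memories:
--         current_cluster.append(memory)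
--         if len(current_cluster) >= cluster_size:
--             clusters.append(current_cluster)
--             current_cluster = []
--
--     if current_cluster:
--         clusters.append(current_cluster)
--
--     return clusters
-- ===== SOURCE B (Python) =====
-- from typing import Any, List
--
-- def _cluster_by_similarity(memories: List[Any],
--                            cluster_size: int = 10) -> List[List[Any]]:
--     step = max(cluster_size, 1)
--     return [memories[i:i + step] for i in range(0, len(memories), step)]
-- ===== Notes on version B (the rewrite author's own statement) =====
-- stated objective: simpler
-- what changed: Replaces the running-buffer accumulation loop (append element-by-element, flush when full, flush the remainder) by direct list slicing at strided index positions, with step = max(cluster_size, 1) since the loop emits singleton clusters for cluster_size <= 1.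
import Mathlib
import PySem

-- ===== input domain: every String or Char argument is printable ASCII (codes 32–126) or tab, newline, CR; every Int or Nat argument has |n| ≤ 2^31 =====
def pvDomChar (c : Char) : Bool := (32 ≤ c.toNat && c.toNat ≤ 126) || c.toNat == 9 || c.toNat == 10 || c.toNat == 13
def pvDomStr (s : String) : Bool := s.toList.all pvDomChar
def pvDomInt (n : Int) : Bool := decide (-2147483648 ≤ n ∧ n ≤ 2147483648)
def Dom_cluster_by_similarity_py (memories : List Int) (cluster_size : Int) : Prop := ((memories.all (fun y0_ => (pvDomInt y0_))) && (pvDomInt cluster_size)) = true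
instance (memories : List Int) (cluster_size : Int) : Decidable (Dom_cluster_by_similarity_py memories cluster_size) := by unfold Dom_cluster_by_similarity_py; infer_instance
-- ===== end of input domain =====

-- B replaces A's running-buffer accumulation (append, flush when full, flush remainder)
-- by slicing the list at strided index positions; same output, chosen for simplicity.

-- ===== PORT A =====
def cluster_by_similarity_py (memories : List Int) (cluster_size : Int) : List (List Int) :=
  let st := memories.foldl
    (fun (st : List (List Int) × List Int) memory =>
      let current_cluster := st.2 ++ [memory]
      if cluster_size ≤ (current_cluster.length : Int) then (st.1 ++ [current_cluster], [])
      else (st.1, current_cluster))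
    ([], [])
  if st.2 ≠ [] then st.1 ++ [st.2] else st.1

-- ===== PORT B =====
def cluster_by_similarity_py_alt (memories : List Int) (cluster_size : Int) : List (List Int) :=
  let step := max cluster_size 1
  (PySem.List.pyRange 0 (memories.length : Int) step).map
    (fun i => PySem.List.slice memories (some i) (some (i + step)))

-- ===== PRECONDITION & SPEC =====
def Spec_cluster_by_similarity_py (memories : List Int) (cluster_size : Int) (out : List (List Int)) : Prop := out = cluster_by_similarity_py_alt memories cluster_size
instance (memories : List Int) (cluster_size : Int) (out : List (List Int)) : Decidable (Spec_cluster_by_similarity_py memories cluster_size out) := by unfold Spec_cluster_by_similarity_py; infer_instance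

-- ===== CLAIM (what is proved, stated in full; the proofs are below) =====
def Claim_equal_cluster_by_similarity_py : Prop := ∀ (memories : List Int) (cluster_size : Int), Dom_cluster_by_similarity_py memories cluster_size → Spec_cluster_by_similarity_py memories cluster_size (cluster_by_similarity_py memories cluster_size)

-- ===== LEMMAS AND PROOFS =====

-- chunks of size (max s 1): the common reference description of both ports
def pvChunks (s : Nat) (xs : List Int) : List (List Int) :=
  if h : xs = [] then [] else xs.take (max s 1) :: pvChunks s (xs.drop (max s 1))
termination_by xs.length
decreasing_by
  cases xs with
  | nil => exact absurd rfl h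
  | cons a l => simp only [List.length_drop, List.length_cons]; omega

theorem pvChunks_nil (s : Nat) : pvChunks s [] = [] := by simp [pvChunks]

theorem pvChunks_cons (s : Nat) (xs : List Int) (hxs : xs ≠ []) :
    pvChunks s xs = xs.take (max s 1) :: pvChunks s (xs.drop (max s 1)) := by
  rw [pvChunks]; simp [hxs]

-- A's fold with the final flush equals pvChunks, for an in-progress buffer cur
theorem portA_inv (cs : Int) (s : Nat) (hs : (s : Int) = max cs 1)
    (xs : List Int) : ∀ (acc : List (List Int)) (cur : List Int), cur.length < s →
    (let st := xs.foldl
        (fun (st : List (List Int) × List Int) memory =>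
          let current_cluster := st.2 ++ [memory]
          if cs ≤ (current_cluster.length : Int) then (st.1 ++ [current_cluster], [])
          else (st.1, current_cluster))
        (acc, cur)
      if st.2 ≠ [] then st.1 ++ [st.2] else st.1)
      = acc ++ pvChunks s (cur ++ xs) := by
  induction xs with
  | nil =>
    intro acc cur hcur
    cases cur with
    | nil => simp [pvChunks_nil]
    | cons c l =>
      simp only [List.foldl_nil, List.append_nil]
      rw [pvChunks_cons s (c :: l) (by simp)]
      have h1 : (c :: l).take (max s 1) = c :: l :=
        List.take_of_length_le (by simp at hcur ⊢; omega)
      have h2 : (c :: l).drop (max s 1) = [] :=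
        List.drop_eq_nil_of_le (by simp at hcur ⊢; omega)
      simp [h1, h2, pvChunks_nil]
  | cons x rest ih =>
    intro acc cur hcur
    simp only [List.foldl_cons]
    by_cases hfl : cs ≤ ((cur ++ [x]).length : Int)
    · -- flush: the buffer has exactly reached size s
      have hl1 : (cur ++ [x]).length = cur.length + 1 := by simp
      have hfl' : cs ≤ ((cur.length : Int) + 1) := by
        rw [hl1] at hfl; push_cast at hfl; exact hfl
      have hlen : (cur ++ [x]).length = max s 1 := by rw [hl1]; omega
      simp only [hfl, if_pos]
      rw [ih (acc ++ [cur ++ [x]]) [] (by simp only [List.length_nil]; omega)]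
      have hxr : cur ++ x :: rest = (cur ++ [x]) ++ rest := by simp
      rw [hxr, pvChunks_cons s ((cur ++ [x]) ++ rest) (by simp)]
      rw [← hlen, List.take_left, List.drop_left]
      simp
    · -- keep filling the buffer
      simp only [hfl, if_neg, not_false_iff]
      have hl1 : (cur ++ [x]).length = cur.length + 1 := by simp
      have hfl' : ¬ cs ≤ ((cur.length : Int) + 1) := by
        rw [hl1] at hfl; push_cast at hfl; exact hfl
      rw [ih acc (cur ++ [x]) (by rw [hl1]; omega)]
      simp

theorem portA_eq_chunks (memories : List Int) (cs : Int) :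
    cluster_by_similarity_py memories cs = pvChunks (max cs 1).toNat memories := by
  have hs : (((max cs 1).toNat : Int)) = max cs 1 := by omega
  have := portA_inv cs (max cs 1).toNat hs memories [] [] (by simp only [List.length_nil]; omega)
  simpa [cluster_by_similarity_py] using this

-- count of a positive-step range, and its unfolding
theorem pyRange_pos_nil (a b s : Int) (hs : 0 < s) (hab : b ≤ a) :
    PySem.List.pyRange a b s = [] := by
  rw [PySem.List.pyRange_of_pos a b hs]
  simp [show ¬ a < b by omega]

theorem pyRange_pos_cons (a b s : Int) (hs : 0 < s) (hab : a < b) :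
    PySem.List.pyRange a b s = a :: PySem.List.pyRange (a + s) b s := by
  rw [PySem.List.pyRange_of_pos a b hs, PySem.List.pyRange_of_pos (a + s) b hs]
  have hkey : ((b - a + s - 1) / s).toNat
      = (if a + s < b then ((b - (a + s) + s - 1) / s).toNat else 0) + 1 := by
    have h1 : b - a + s - 1 = (b - a - 1) + 1 * s := by ring
    have h2 : (b - a + s - 1) / s = (b - a - 1) / s + 1 := by
      rw [h1, Int.add_mul_ediv_right _ _ (by omega : s ≠ 0)]
    by_cases hbs : a + s < b
    · have h3 : b - (a + s) + s - 1 = b - a - 1 := by ring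
      have h4 : 0 ≤ (b - a - 1) / s := Int.ediv_nonneg (by omega) (by omega)
      simp [hbs, h3, h2]; omega
    · have h5 : (b - a - 1) / s = 0 := Int.ediv_eq_zero_of_lt (by omega) (by omega)
      simp [hbs, h2, h5]
  rw [if_pos hab, hkey, List.range_succ_eq_map]
  simp only [List.map_cons, List.map_map]
  congr 1
  · ring
  · apply List.map_congr_left
    intro k _
    simp [Function.comp]; ring

theorem pyRange_pos_shift (a b c s : Int) (hs : 0 < s) :
    PySem.List.pyRange (a + c) (b + c) s = (PySem.List.pyRange a b s).map (· + c) := by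
  rw [PySem.List.pyRange_of_pos a b hs, PySem.List.pyRange_of_pos (a + c) (b + c) hs]
  by_cases hab : a < b
  · rw [if_pos hab, if_pos (by omega : a + c < b + c), List.map_map]
    have h1 : b + c - (a + c) = b - a := by ring
    rw [h1]
    apply List.map_congr_left
    intro k _
    simp only [Function.comp]; ring
  · rw [if_neg hab, if_neg (by omega : ¬ a + c < b + c)]
    simp

-- B's strided slicing equals pvChunks
theorem portB_eq_chunks (s : Int) (hs : 0 < s) (xs : List Int) :
    (PySem.List.pyRange 0 (xs.length : Int) s).map
      (fun i => PySem.List.slice xs (some i) (some (i + s))) = pvChunks s.toNat xs := by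
  induction hn : xs.length using Nat.strong_induction_on generalizing xs with
  | _ n ih =>
  subst hn
  cases xs with
  | nil => simp [pvChunks_nil, pyRange_pos_nil 0 0 s hs le_rfl]
  | cons y l =>
    have hlen : (0 : Int) < ((y :: l).length : Int) := by simp
    rw [pyRange_pos_cons 0 _ s hs hlen]
    have hshift : PySem.List.pyRange (0 + s) ((y :: l).length : Int) s
        = (PySem.List.pyRange 0 (((y :: l).length : Int) - s) s).map (· + s) := by
      have := pyRange_pos_shift 0 (((y :: l).length : Int) - s) s s hs
      simpa using this
    rw [pvChunks_cons s.toNat (y :: l) (by simp)]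
    have hmax : max s.toNat 1 = s.toNat := by omega
    simp only [List.map_cons, hmax]
    congr 1
    · -- head: the first chunk
      rw [zero_add, PySem.List.slice_zero_start, PySem.List.slice_to _ (by omega : (0:Int) ≤ s)]
    · -- tail
      rw [hshift, List.map_map]
      have htail : ∀ i ∈ PySem.List.pyRange 0 (((y :: l).length : Int) - s) s,
          ((fun i => PySem.List.slice (y :: l) (some i) (some (i + s))) ∘ (· + s)) i
          = PySem.List.slice ((y :: l).drop s.toNat) (some i) (some (i + s)) := by
        intro i hi
        have hi0 : 0 ≤ i := ((PySem.List.mem_pyRange_iff_of_pos hs i).mp hi).1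
        simp only [Function.comp]
        rw [PySem.List.slice_toNat _ (by omega : (0:Int) ≤ i + s) (by omega : (0:Int) ≤ i + s + s),
            PySem.List.slice_toNat _ (by omega : (0:Int) ≤ i) (by omega : (0:Int) ≤ i + s)]
        have h1 : (i + s).toNat = i.toNat + s.toNat := by omega
        have h2 : (i + s + s).toNat = (i + s).toNat + s.toNat := by omega
        rw [List.drop_drop, h1, h2]
        congr 1
        · omega
        · rw [Nat.add_comm]
      rw [List.map_congr_left htail]
      by_cases hls : s.toNat ≤ (y :: l).length
      · have hcast : (((y :: l).length : Int) - s) = (((y :: l).drop s.toNat).length : Int) := by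
          rw [List.length_drop]; omega
        rw [hcast, ih ((y :: l).drop s.toNat).length
              (by rw [List.length_drop]; simp only [List.length_cons]; omega)
              ((y :: l).drop s.toNat) rfl]
      · have hd : (y :: l).drop s.toNat = [] := List.drop_eq_nil_of_le (by omega)
        rw [hd, pvChunks_nil, pyRange_pos_nil 0 _ s hs (by omega)]
        simp

-- ===== VERDICT (by name: the statement is the Claim_ definition above) =====
theorem cluster_by_similarity_py_spec : Claim_equal_cluster_by_similarity_py := by
  intro memories cluster_size _
  unfold Spec_cluster_by_similarity_py cluster_by_similarity_py_alt
  rw [portA_eq_chunks]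
  rw [portB_eq_chunks (max cluster_size 1) (by omega) memories]
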